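-- pv_equiv track=rewrite | github.com/lmacka/claudia | app/main.py | _md_blocks
-- ===== SOURCE A (Python) =====
-- def _md_blocks(text: str):
--     buf: list[str] = []
--
--     def flush():
--         if buf:
--             yield ("para", " ".join(buf).strip())
--             buf.clear()
--
--     for line in text.splitlines():
--         s = line.strip()
--         if not s:
--             yield from flush()
--             yield ("blank", "")
--         elif s.startswith("# "):
--             yield from flush()
--             yield ("h1", s[2:])
--         elif s.startswith("## "):
--             yield from flush()
--             yield ("h2", s[3:])
--         elif s.startswith("- ") or s.startswith("* "):
--             yield from flush()
--             yield ("bullet", s[2:])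
--         else:
--             buf.append(s)
--     yield from flush()
-- ===== SOURCE B (Python) =====
-- def _md_blocks(text: str):
--     def is_para(s):
--         return bool(s) and not (
--             s.startswith("# ") or s.startswith("## ")
--             or s.startswith("- ") or s.startswith("* ")
--         )
--
--     lines = [line.strip() for line in text.splitlines()]
--     n = len(lines)
--     i = 0
--     while i < n:
--         s = lines[i]
--         if is_para(s):
--             j = i
--             while j < n and is_para(lines[j]):
--                 j += 1
--             yield ("para", " ".join(lines[i:j]).strip())
--             i = j
--         else:
--             if not s:
--                 yield ("blank", "")
--             elif s.startswith("# "):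
--                 yield ("h1", s[2:])
--             elif s.startswith("## "):
--                 yield ("h2", s[3:])
--             else:
--                 yield ("bullet", s[2:])
--             i += 1
-- ===== Notes on version B (the rewrite author's own statement) =====
-- stated objective: alternative
-- what changed: B drops A's mutable buffer and flush closure entirely: it strips all lines up front, then scans them with an index, finding the end of each maximal paragraph run with an inner takewhile-style scan and yielding the whole run as one joined para block, and yielding each boundary line as its token.
import Mathlib
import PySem

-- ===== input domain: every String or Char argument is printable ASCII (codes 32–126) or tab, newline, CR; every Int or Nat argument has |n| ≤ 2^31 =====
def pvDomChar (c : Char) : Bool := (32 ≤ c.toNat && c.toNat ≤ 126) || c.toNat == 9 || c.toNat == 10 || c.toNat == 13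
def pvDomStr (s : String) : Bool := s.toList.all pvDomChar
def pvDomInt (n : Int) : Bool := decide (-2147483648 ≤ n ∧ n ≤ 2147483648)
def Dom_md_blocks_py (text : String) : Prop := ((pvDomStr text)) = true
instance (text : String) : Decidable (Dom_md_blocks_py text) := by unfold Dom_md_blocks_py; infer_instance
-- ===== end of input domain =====

-- B is a run-splitter: it scans the stripped lines with an index, emitting each maximal is_para run as one joined block and each boundary line as its token — no buffer/flush state as in A; same cost, alternative structure; both Pythons are generators and the claim is about the yielded sequence.


-- ===== PORT A =====
-- flush(): if buf: yield ("para", " ".join(buf).strip()); buf.clear()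
def mdAFlush (buf : List String) (out : List (String × String)) :
    List String × List (String × String) :=
  if buf.isEmpty then (buf, out)
  else ([], out ++ [("para", PySem.Str.strip (PySem.Str.join " " buf))])

-- one iteration of A's for-loop over a line
def mdAStep (st : List String × List (String × String)) (line : String) :
    List String × List (String × String) :=
  let s := PySem.Str.strip line
  if s = "" then
    let fo := mdAFlush st.1 st.2
    (fo.1, fo.2 ++ [("blank", "")])
  else if PySem.Str.startswith s "# " then
    let fo := mdAFlush st.1 st.2
    (fo.1, fo.2 ++ [("h1", PySem.Str.slice s (some 2) none)])
  else if PySem.Str.startswith s "## " then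
    let fo := mdAFlush st.1 st.2
    (fo.1, fo.2 ++ [("h2", PySem.Str.slice s (some 3) none)])
  else if PySem.Str.startswith s "- " || PySem.Str.startswith s "* " then
    let fo := mdAFlush st.1 st.2
    (fo.1, fo.2 ++ [("bullet", PySem.Str.slice s (some 2) none)])
  else
    (st.1 ++ [s], st.2)

def md_blocks_py (text : String) : List (String × String) :=
  let st := (PySem.Str.splitlines text).foldl mdAStep ([], [])
  (mdAFlush st.1 st.2).2

-- ===== PORT B =====
-- is_para(s): bool(s) and not (startswith "# "/"## "/"- "/"* ")
def mdIsPara (s : String) : Bool :=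
  s ≠ "" && !(PySem.Str.startswith s "# " || PySem.Str.startswith s "## "
              || PySem.Str.startswith s "- " || PySem.Str.startswith s "* ")

-- Source B's outer while-loop walks an index over the stripped lines; recursion on the
-- remaining suffix transcribes 'i' advancing.  Its inner while-loop computes j = end of
-- the longest is_para run, so lines[i:j] = takeWhile is_para and the suffix from j = dropWhile.
def mdEmit (lines : List String) : List (String × String) :=
  match lines with
  | [] => []
  | s :: rest =>
    if mdIsPara s then
      ("para", PySem.Str.strip (PySem.Str.join " " ((s :: rest).takeWhile mdIsPara)))
        :: mdEmit (rest.dropWhile mdIsPara)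
    else
      (if s = "" then ("blank", "")
       else if PySem.Str.startswith s "# " then ("h1", PySem.Str.slice s (some 2) none)
       else if PySem.Str.startswith s "## " then ("h2", PySem.Str.slice s (some 3) none)
       else ("bullet", PySem.Str.slice s (some 2) none))
        :: mdEmit rest
  termination_by lines.length
  decreasing_by
  · exact Nat.lt_succ_of_le (rest.length_dropWhile_le mdIsPara)
  · exact Nat.lt_succ_self _

def md_blocks_py_alt (text : String) : List (String × String) :=
  mdEmit ((PySem.Str.splitlines text).map PySem.Str.strip)

-- ===== PRECONDITION & SPEC =====
def Spec_md_blocks_py (text : String) (out : List (String × String)) : Prop := out = md_blocks_py_alt text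
instance (text : String) (out : List (String × String)) : Decidable (Spec_md_blocks_py text out) := by unfold Spec_md_blocks_py; infer_instance

-- ===== CLAIM =====
def Claim_equal_md_blocks_py : Prop := ∀ (text : String), Dom_md_blocks_py text → Spec_md_blocks_py text (md_blocks_py text)

-- ===== LEMMAS AND PROOFS =====
-- proof-side: what A's flush appends
def mdFlushL (buf : List String) : List (String × String) :=
  if buf.isEmpty then [] else [("para", PySem.Str.strip (PySem.Str.join " " buf))]

-- proof-side: the token both A's elif-chain and B's boundary branch produce on a non-para line
def mdTok (s : String) : String × String :=
  if s = "" then ("blank", "")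
  else if PySem.Str.startswith s "# " then ("h1", PySem.Str.slice s (some 2) none)
  else if PySem.Str.startswith s "## " then ("h2", PySem.Str.slice s (some 3) none)
  else ("bullet", PySem.Str.slice s (some 2) none)

theorem mdAStep_eq (buf : List String) (out : List (String × String)) (l : String) :
    mdAStep (buf, out) l =
      if mdIsPara (PySem.Str.strip l) then (buf ++ [PySem.Str.strip l], out)
      else ([], out ++ mdFlushL buf ++ [mdTok (PySem.Str.strip l)]) := by
  unfold mdAStep mdAFlush mdFlushL mdIsPara mdTok
  split_ifs <;> simp_all

-- proof-side: A's residual computation on stripped lines with pending buffer buf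
def mdSpecB (buf : List String) : List String → List (String × String)
  | [] => mdFlushL buf
  | s :: ss =>
    if mdIsPara s then mdSpecB (buf ++ [s]) ss
    else mdFlushL buf ++ [mdTok s] ++ mdSpecB [] ss

theorem mdSpecB_nil (buf : List String) : mdSpecB buf [] = mdFlushL buf := rfl

theorem mdSpecB_cons (buf : List String) (s : String) (ss : List String) :
    mdSpecB buf (s :: ss)
      = if mdIsPara s then mdSpecB (buf ++ [s]) ss
        else mdFlushL buf ++ [mdTok s] ++ mdSpecB [] ss := rfl

theorem mdA_fold_eq_specB (lines : List String) (buf : List String)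
    (out : List (String × String)) :
    (mdAFlush ((lines.foldl mdAStep (buf, out))).1 ((lines.foldl mdAStep (buf, out))).2).2
      = out ++ mdSpecB buf (lines.map PySem.Str.strip) := by
  induction lines generalizing buf out with
  | nil =>
    simp only [List.foldl, List.map, mdSpecB_nil]
    unfold mdAFlush mdFlushL
    split <;> simp_all
  | cons l ls ih =>
    simp only [List.foldl, List.map]
    rw [mdAStep_eq]
    by_cases h : mdIsPara (PySem.Str.strip l) = true
    · simp only [h, if_true]
      rw [ih]
      simp [mdSpecB_cons, h]
    · simp only [h, if_false, Bool.false_eq_true]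
      rw [ih []]
      simp [mdSpecB_cons, h, List.append_assoc]

theorem mdEmit_boundary (s : String) (rest : List String) (h : mdIsPara s = false) :
    mdEmit (s :: rest) = mdTok s :: mdEmit rest := by
  rw [mdEmit]
  simp [h, mdTok]

-- mdEmit satisfies the run-splitting equation
theorem mdEmit_run (ss : List String) :
    mdEmit ss
      = (if ss.takeWhile mdIsPara = [] then []
         else [("para", PySem.Str.strip (PySem.Str.join " " (ss.takeWhile mdIsPara)))])
        ++ mdEmit (ss.dropWhile mdIsPara) := by
  cases ss with
  | nil => simp
  | cons s rest =>
    by_cases h : mdIsPara s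
    · rw [mdEmit]
      rw [List.takeWhile_cons_of_pos h, List.dropWhile_cons_of_pos h]
      simp [h]
    · rw [List.takeWhile_cons_of_neg (by simp [h]), List.dropWhile_cons_of_neg (by simp [h])]
      simp

theorem mdSpecB_eq_emit (ss : List String) (buf : List String) :
    mdSpecB buf ss
      = (if buf ++ ss.takeWhile mdIsPara = [] then []
         else [("para", PySem.Str.strip (PySem.Str.join " " (buf ++ ss.takeWhile mdIsPara)))])
        ++ mdEmit (ss.dropWhile mdIsPara) := by
  induction ss generalizing buf with
  | nil => simp [mdSpecB, mdFlushL, mdEmit, List.isEmpty_iff]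
  | cons s rest ih =>
    by_cases h : mdIsPara s
    · rw [mdSpecB_cons, if_pos h, ih, List.takeWhile_cons_of_pos h,
          List.dropWhile_cons_of_pos h,
          show buf ++ s :: List.takeWhile mdIsPara rest
              = (buf ++ [s]) ++ List.takeWhile mdIsPara rest by simp]
    · have hb : mdIsPara s = false := by simpa using h
      rw [mdSpecB_cons, if_neg h, ih [],
          List.takeWhile_cons_of_neg (by simp [hb]),
          List.dropWhile_cons_of_neg (by simp [hb]), mdEmit_boundary s rest hb]
      simp only [List.nil_append]
      rw [← mdEmit_run rest]
      cases buf with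
      | nil => simp [mdFlushL]
      | cons b bs => simp [mdFlushL]

-- ===== VERDICT =====
theorem md_blocks_py_spec : Claim_equal_md_blocks_py := by
  intro text _
  unfold Spec_md_blocks_py md_blocks_py md_blocks_py_alt
  rw [mdA_fold_eq_specB, mdSpecB_eq_emit]
  simp only [List.nil_append]
  exact (mdEmit_run _).symm
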